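-- pv_equiv track=rewrite | github.com/lukelu389/pythonProjects | year2024/day2024_12_15.py | count_discrepant_up_to
-- ===== SOURCE A (Python) =====
-- def count_discrepant_up_to(N):
--     """Count discrepant numbers up to N without storing results."""
--     count = 0
--     power_of_10 = 10  # Start rounding at 10^1
--
--     while power_of_10 <= N:
--         base_unit = power_of_10 // 10  # 10^0, 10^1, ..., determines the "step size"
--         start = 45 * base_unit         # First discrepant number in the range
--         end = 49 * base_unit           # Last discrepant number in the range
--
--         # Add all numbers in the range [start, end] that are <= N
--         if start <= N:
--             count += max(0, min(end, N) - start + 1)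
--
--         power_of_10 *= 10  # Move to the next power of 10
--
--     return count
-- ===== SOURCE B (Python) =====
-- def count_discrepant_up_to(N):
--     """Count discrepant numbers up to N via a closed form (no loop over powers of 10)."""
--     # L = number of fully contained ranges [45*10**k, 49*10**k] with 49*10**k <= N
--     L = len(str(N // 49)) if N >= 49 else 0
--     # each full range holds 4*10**k + 1 numbers; sum of 4*10**k for k < L is 4*(10**L-1)//9
--     count = 4 * (10 ** L - 1) // 9 + L
--     lo = 45 * 10 ** L
--     if lo <= N:  # topmost, partially covered range
--         count += N - lo + 1
--     return count
-- ===== Notes on version B (the rewrite author's own statement) =====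
-- stated objective: alternative
-- what changed: Replaced the loop over powers of 10 with a closed form: L = number of fully contained ranges (decimal digit count of N//49), the geometric-sum formula 4*(10**L-1)//9 + L for the full ranges, plus the single partial top range.
import Mathlib
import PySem

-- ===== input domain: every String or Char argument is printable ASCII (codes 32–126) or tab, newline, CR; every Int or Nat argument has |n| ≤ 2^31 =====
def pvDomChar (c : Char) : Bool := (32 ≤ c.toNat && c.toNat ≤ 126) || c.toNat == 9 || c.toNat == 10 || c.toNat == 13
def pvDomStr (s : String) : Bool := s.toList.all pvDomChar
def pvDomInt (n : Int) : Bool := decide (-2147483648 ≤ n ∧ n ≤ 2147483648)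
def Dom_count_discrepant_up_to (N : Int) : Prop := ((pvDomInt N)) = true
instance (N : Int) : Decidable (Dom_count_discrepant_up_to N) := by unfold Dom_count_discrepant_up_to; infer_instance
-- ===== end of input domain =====

-- B replaces A's loop over powers of 10 by a closed form (digit count + geometric-sum formula): an alternative, loop-free algorithm.

-- ===== PORT A =====
-- the while loop of A: state (count, power_of_10); 0 < p is the loop invariant needed for termination
def pvLoopA (N count p : Int) (hp : 0 < p) : Int :=
  if h : p ≤ N then
    let base_unit := PySem.Int.floordiv p 10
    let start := 45 * base_unit
    let «end» := 49 * base_unit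
    pvLoopA N (if start ≤ N then count + max 0 (min «end» N - start + 1) else count) (p * 10)
      (by omega)
  else count
termination_by (N + 1 - p).toNat
decreasing_by omega

def count_discrepant_up_to (N : Int) : Int := pvLoopA N 0 10 (by norm_num)

-- ===== PORT B =====
def count_discrepant_up_to_alt (N : Int) : Int :=
  let L : Int := if 49 ≤ N then PySem.Str.len (PySem.Int.toStr (PySem.Int.floordiv N 49)) else 0
  let count : Int := PySem.Int.floordiv (4 * (10 ^ L.toNat - 1)) 9 + L
  let lo : Int := 45 * 10 ^ L.toNat
  if lo ≤ N then count + (N - lo + 1) else count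

-- ===== PRECONDITION & SPEC =====
def Spec_count_discrepant_up_to (N : Int) (out : Int) : Prop := out = count_discrepant_up_to_alt N
instance (N : Int) (out : Int) : Decidable (Spec_count_discrepant_up_to N out) := by unfold Spec_count_discrepant_up_to; infer_instance

-- ===== CLAIM (what is proved, stated in full; the proofs are below) =====
def Claim_equal_count_discrepant_up_to : Prop := ∀ (N : Int), Dom_count_discrepant_up_to N → Spec_count_discrepant_up_to N (count_discrepant_up_to N)

-- ===== LEMMAS AND PROOFS =====

-- repunit: pvRep L = (10^L - 1) / 9, the sum of 10^k for k < L
def pvRep : Nat → Int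
  | 0 => 0
  | (L + 1) => 10 * pvRep L + 1

lemma pvRep_nine (L : Nat) : 9 * pvRep L = 10 ^ L - 1 := by
  induction L with
  | zero => simp [pvRep]
  | succ L ih => rw [pvRep, pow_succ]; ring_nf; ring_nf at ih; omega

lemma pvLoopA_congr (N c p p' : Int) (hp : 0 < p) (hp' : 0 < p') (h : p = p') :
    pvLoopA N c p hp = pvLoopA N c p' hp' := by subst h; rfl

lemma pvLoopA_stop (N c p : Int) (hp : 0 < p) (h : N < p) : pvLoopA N c p hp = c := by
  rw [pvLoopA, dif_neg (by omega)]

-- one run of A's loop, started at power 10^(k+1), when exactly the ranges k..k+L-1 are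
-- fully below N and range k+L is (at most) partially below N
lemma pvLoopA_run (L : Nat) : ∀ (k : Nat) (c N : Int) (hp : 0 < (10:Int) ^ (k + 1)),
    (L = 0 ∨ 49 * 10 ^ (k + L - 1) ≤ N) → N < 49 * 10 ^ (k + L) →
    pvLoopA N c ((10:Int) ^ (k + 1)) hp =
      c + 4 * 10 ^ k * pvRep L + L +
        (if 45 * (10:Int) ^ (k + L) ≤ N then N - 45 * 10 ^ (k + L) + 1 else 0) := by
  induction L with
  | zero =>
    intro k c N hp _ h2
    have hX : (0:Int) < 10 ^ k := by positivity
    have hdiv : PySem.Int.floordiv ((10:Int) ^ (k + 1)) 10 = 10 ^ k := by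
      rw [PySem.Int.floordiv_eq_ediv_of_pos (by norm_num), pow_succ,
        Int.mul_ediv_cancel _ (by norm_num)]
    simp only [Nat.add_zero] at h2 ⊢
    rw [pvLoopA]
    by_cases h : (10:Int) ^ (k + 1) ≤ N
    · rw [dif_pos h]
      simp only [hdiv]
      have hnext : N < (10:Int) ^ (k + 1) * 10 := by
        have : (10:Int) ^ (k+1) * 10 = 100 * 10 ^ k := by ring
        rw [this]; omega
      by_cases hs : 45 * (10:Int) ^ k ≤ N
      · rw [if_pos hs, pvLoopA_stop _ _ _ _ hnext, if_pos hs]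
        have hmin : min (49 * (10:Int) ^ k) N = N := min_eq_right (le_of_lt h2)
        rw [hmin]
        have : max 0 (N - 45 * (10:Int) ^ k + 1) = N - 45 * 10 ^ k + 1 := by omega
        rw [this]; simp [pvRep]
      · rw [if_neg hs, pvLoopA_stop _ _ _ _ hnext, if_neg hs]; simp [pvRep]
    · rw [dif_neg h]
      have hcond : ¬ 45 * (10:Int) ^ k ≤ N := by
        have h10 : (10:Int) ^ (k + 1) = 10 * 10 ^ k := by ring
        rw [h10] at h; omega
      rw [if_neg hcond]; simp [pvRep]
  | succ L ih =>
    intro k c N hp h1 h2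
    have hX : (0:Int) < 10 ^ k := by positivity
    have hmono : (10:Int) ^ k ≤ 10 ^ (k + L) := by
      apply pow_le_pow_right₀ (by norm_num) (by omega)
    have hfull : 49 * (10:Int) ^ (k + L) ≤ N := by
      rcases h1 with h1 | h1
      · omega
      · simpa [Nat.add_sub_cancel] using h1
    have h49 : 49 * (10:Int) ^ k ≤ N := by nlinarith
    have h : (10:Int) ^ (k + 1) ≤ N := by
      have : (10:Int) ^ (k + 1) = 10 * 10 ^ k := by ring
      omega
    have hdiv : PySem.Int.floordiv ((10:Int) ^ (k + 1)) 10 = 10 ^ k := by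
      rw [PySem.Int.floordiv_eq_ediv_of_pos (by norm_num), pow_succ,
        Int.mul_ediv_cancel _ (by norm_num)]
    rw [pvLoopA, dif_pos h]
    simp only [hdiv]
    rw [if_pos (by omega : 45 * (10:Int) ^ k ≤ N)]
    rw [min_eq_left (by omega : 49 * (10:Int) ^ k ≤ N)]
    have hmax : max 0 (49 * (10:Int) ^ k - 45 * 10 ^ k + 1) = 4 * 10 ^ k + 1 := by omega
    rw [hmax]
    rw [pvLoopA_congr N _ _ ((10:Int) ^ (k + 1 + 1)) (by positivity) (by positivity) (by ring)]
    rw [ih (k + 1) _ N (by positivity)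
      (Or.inr (by simpa [Nat.add_sub_cancel] using (show 49 * (10:Int) ^ (k + 1 + L - 1) ≤ N by
        have : k + 1 + L - 1 = k + L := by omega
        rw [this]; exact hfull)))
      (by have : k + 1 + L = k + (L + 1) := by omega
          rw [this]; exact h2)]
    have harr : k + 1 + L = k + (L + 1) := by omega
    rw [harr, pvRep]
    push_cast
    ring_nf

-- digit count of m with 10^L ≤ m < 10^(L+1) is L+1
lemma pvLenDigits (L m : Nat) (h1 : 10 ^ L ≤ m) (h2 : m < 10 ^ (L + 1)) :
    (Nat.toDigits 10 m).length = L + 1 := by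
  have hub : (Nat.toDigits 10 m).length ≤ L + 1 :=
    (Nat.length_toDigits_le_iff (by norm_num) (by omega)).2 h2
  have hpos : 0 < (Nat.toDigits 10 m).length := Nat.length_toDigits_pos
  cases L with
  | zero => omega
  | succ L' =>
    have hlb : ¬ (Nat.toDigits 10 m).length ≤ L' + 1 := by
      rw [Nat.length_toDigits_le_iff (by norm_num) (by omega)]
      omega
    omega

-- PySem string length of str(q) for positive q in a decade
lemma pvLenToStr (L : Nat) (q : Int) (hq : 0 < q) (h1 : (10:Int) ^ L ≤ q) (h2 : q < 10 ^ (L + 1)) :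
    PySem.Str.len (PySem.Int.toStr q) = (L : Int) + 1 := by
  rw [PySem.Str.len_eq, PySem.Int.toList_toStr]
  have htc : PySem.Int.toChars q = Nat.toDigits 10 q.toNat := by
    rw [PySem.Int.toChars, if_neg (by omega)]
  rw [htc]
  have hp1 : ((10:Nat) ^ L : Int) ≤ q := by push_cast; exact h1
  have hp2 : q < ((10:Nat) ^ (L + 1) : Int) := by push_cast; exact h2
  have h1' : 10 ^ L ≤ q.toNat := by omega
  have h2' : q.toNat < 10 ^ (L + 1) := by omega
  rw [pvLenDigits L q.toNat h1' h2']
  push_cast; ring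

-- B's closed form equals the same expression as pvLoopA_run at k = 0
lemma pvAlt_formula (L : Nat) (N : Int)
    (h1 : L = 0 ∨ 49 * 10 ^ (L - 1) ≤ N) (h2 : N < 49 * 10 ^ L) :
    count_discrepant_up_to_alt N =
      4 * pvRep L + L + (if 45 * (10:Int) ^ L ≤ N then N - 45 * 10 ^ L + 1 else 0) := by
  have hrep : PySem.Int.floordiv (4 * ((10:Int) ^ L - 1)) 9 = 4 * pvRep L := by
    have h9 : 4 * ((10:Int) ^ L - 1) = 9 * (4 * pvRep L) := by
      have := pvRep_nine L; ring_nf; ring_nf at this; omega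
    rw [h9, PySem.Int.floordiv_eq_ediv_of_pos (by norm_num),
      Int.mul_ediv_cancel_left _ (by norm_num)]
  by_cases hN : 49 ≤ N
  · -- here L ≥ 1
    rcases L with _ | L'
    · exfalso; simp at h2; omega
    · have hL1 : 49 * (10:Int) ^ L' ≤ N := by simpa [Nat.add_sub_cancel] using h1.resolve_left (by omega)
      have hq1 : (10:Int) ^ L' ≤ PySem.Int.floordiv N 49 := by
        rw [PySem.Int.le_floordiv_iff_mul_le (by norm_num)]; omega
      have hq2 : PySem.Int.floordiv N 49 < 10 ^ (L' + 1) := by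
        rw [PySem.Int.floordiv_lt_iff_lt_mul (by norm_num)]; omega
      have hq0 : 0 < PySem.Int.floordiv N 49 := by
        have hx : (0:Int) < 10 ^ L' := by positivity
        omega
      have hlen := pvLenToStr L' _ hq0 hq1 hq2
      have htn : ((L':Int) + 1).toNat = L' + 1 := by omega
      unfold count_discrepant_up_to_alt
      rw [if_pos hN, hlen]
      simp only [htn, hrep]
      push_cast
      split_ifs with hlo <;> ring
  · -- N < 49 forces L = 0
    have hL0 : L = 0 := by
      rcases h1 with h1 | h1
      · exact h1
      · exfalso
        have hx : (1:Int) ≤ 10 ^ (L - 1) := one_le_pow₀ (by norm_num)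
        omega
    subst hL0
    unfold count_discrepant_up_to_alt
    rw [if_neg hN]
    simp only [Int.toNat_zero, pow_zero, mul_one, pvRep]
    have h0 : PySem.Int.floordiv (4 * ((1:Int) - 1)) 9 = 0 := by
      rw [PySem.Int.floordiv_eq_ediv_of_pos (by norm_num)]; norm_num
    simp only [h0]
    norm_num

-- ===== VERDICT (by name: the statement is the Claim_ definition above) =====
lemma pv_bracket (N : Int) (hN : 49 ≤ N) :
    ∃ L' : Nat, 49 * (10:Int) ^ L' ≤ N ∧ N < 49 * 10 ^ (L' + 1) := by
  have hq0 : (1:Int) ≤ PySem.Int.floordiv N 49 := by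
    rw [PySem.Int.le_floordiv_iff_mul_le (by norm_num)]; omega
  set q := PySem.Int.floordiv N 49 with hqdef
  have hq49 : q * 49 ≤ N := (PySem.Int.le_floordiv_iff_mul_le (by norm_num)).1 (le_refl q)
  have hq49' : N < (q + 1) * 49 := by
    rw [← hqdef] at *
    have := (PySem.Int.floordiv_lt_iff_lt_mul (a := N) (b := 49) (q := q + 1) (by norm_num)).1 (by omega)
    exact this
  obtain ⟨len, hlen⟩ : ∃ l, (Nat.toDigits 10 q.toNat).length = l := ⟨_, rfl⟩
  have hlenpos : 0 < len := hlen ▸ Nat.length_toDigits_pos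
  obtain ⟨L', rfl⟩ : ∃ L', len = L' + 1 := ⟨len - 1, by omega⟩
  refine ⟨L', ?_, ?_⟩
  · -- 10^L' ≤ q.toNat
    have hlb : 10 ^ L' ≤ q.toNat := by
      rcases Nat.eq_zero_or_pos L' with h | h
      · subst h; simpa using (by omega : 1 ≤ q.toNat)
      · by_contra hc
        have : (Nat.toDigits 10 q.toNat).length ≤ L' :=
          (Nat.length_toDigits_le_iff (by norm_num) h).2 (by omega)
        omega
    have : ((10 ^ L' : Nat) : Int) ≤ q := by omega
    push_cast at this
    omega
  · have hub : q.toNat < 10 ^ (L' + 1) :=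
      (Nat.length_toDigits_le_iff (by norm_num) (by omega)).1 (le_of_eq hlen)
    have : q < ((10 ^ (L' + 1) : Nat) : Int) := by omega
    push_cast at this
    omega

-- ===== VERDICT (by name: the statement is the Claim_ definition above) =====
theorem count_discrepant_up_to_spec : Claim_equal_count_discrepant_up_to := by
  intro N _
  unfold Spec_count_discrepant_up_to count_discrepant_up_to
  by_cases hN : 49 ≤ N
  · obtain ⟨L', hA, hB⟩ := pv_bracket N hN
    have hrun := pvLoopA_run (L' + 1) 0 0 N (by norm_num)
      (Or.inr (by simpa using hA)) (by simpa using hB)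
    have halt := pvAlt_formula (L' + 1) N (Or.inr (by simpa using hA)) hB
    simp only [pow_one, pow_zero, zero_add, mul_one] at hrun
    rw [hrun, halt]
  · have hrun := pvLoopA_run 0 0 0 N (by norm_num) (Or.inl rfl) (by norm_num; omega)
    have halt := pvAlt_formula 0 N (Or.inl rfl) (by norm_num; omega)
    simp only [pow_one, pow_zero, zero_add, mul_one] at hrun
    rw [hrun, halt]
    norm_num
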